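-- pv_equiv track=rewrite | github.com/d3d3t3t3/PythonPratice | code/fibonachicken_modify.py | make_fibonacci_set
-- ===== SOURCE A (Python) =====
-- def make_fibonacci_set(n):
--     """
--     n보다 작거나 같을 때까지 [[0, 0], [1, 1], [2, 1], [3, 2], [5, 3] ...] 2차원 배열 생성
--     """
--     fibonacci_set = []
--     fibonacci_set.append([0, 0])
--     fibonacci_set.append([1, 1])
--     key = 1
--     value = 1
--     while key + value <= n:
--         key, value = key + value, key
--         key_value_set = [key, value]
--         fibonacci_set.append(key_value_set)
--     return fibonacci_set
-- ===== SOURCE B (Python) =====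
-- def _fib_pair(i):
--     """Return (fib(i), fib(i+1)) by the fast-doubling identities."""
--     if i == 0:
--         return (0, 1)
--     a, b = _fib_pair(i // 2)
--     c = a * (2 * b - a)
--     d = a * a + b * b
--     if i % 2:
--         return (d, c + d)
--     return (c, d)
--
--
-- def make_fibonacci_set(n):
--     # Index-based: the i-th pair is [fib(i), fib(i-1)], each Fibonacci number
--     # computed independently by fast doubling; no running recurrence state.
--     out = [[0, 0], [1, 1]]
--     i = 3
--     while _fib_pair(i)[0] <= n:
--         out.append([_fib_pair(i)[0], _fib_pair(i - 1)[0]])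
--         i += 1
--     return out
-- ===== Notes on version B (the rewrite author's own statement) =====
-- stated objective: alternative
-- what changed: B is index-based: it computes each Fibonacci number independently by a fast-doubling recursion (_fib_pair) and emits [fib(i), fib(i-1)] while fib(i) <= n, instead of A's single loop that carries the (key, value) recurrence state.
import Mathlib
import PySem

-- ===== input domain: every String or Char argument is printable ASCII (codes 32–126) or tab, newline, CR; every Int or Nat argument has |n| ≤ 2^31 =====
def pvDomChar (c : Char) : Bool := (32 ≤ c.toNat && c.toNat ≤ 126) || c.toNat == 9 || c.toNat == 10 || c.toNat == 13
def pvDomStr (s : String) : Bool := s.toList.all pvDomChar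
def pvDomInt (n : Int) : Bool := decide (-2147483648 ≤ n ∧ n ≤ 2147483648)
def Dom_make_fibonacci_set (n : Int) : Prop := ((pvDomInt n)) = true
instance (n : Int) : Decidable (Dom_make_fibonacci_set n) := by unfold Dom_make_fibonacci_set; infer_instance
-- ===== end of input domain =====

-- B is index-based: it computes each Fibonacci number independently by fast doubling
-- instead of carrying A's (key, value) recurrence state through one loop (objective: alternative).

-- ===== PORT A =====
-- A's while loop: state (key, value), append [key+value, key] while key+value <= n.
-- The Nat argument is only a termination fuel; (n+2).toNat is proved adequate below
-- (the loop's sum grows by at least 1 per step), so the loop always exits via its test.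
def fibLoopA (n : Int) : Nat → Int → Int → List (List Int) → List (List Int)
  | fuel + 1, key, value, acc =>
      if key + value ≤ n then
        fibLoopA n fuel (key + value) key (acc ++ [[key + value, key]])
      else acc
  | 0, _, _, acc => acc

def make_fibonacci_set (n : Int) : List (List Int) :=
  fibLoopA n (n + 2).toNat 1 1 ([] ++ [[0, 0]] ++ [[1, 1]])

-- ===== PORT B =====
-- Source B's _fib_pair: (fib i, fib (i+1)) by fast doubling (the index i, a nonnegative
-- counter in Source B, is a Nat here; i // 2 on a nonnegative int is Nat division).
def fibPairB : Nat → Int × Int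
  | 0 => (0, 1)
  | i + 1 =>
      let p := fibPairB ((i + 1) / 2)
      let a := p.1
      let b := p.2
      let c := a * (2 * b - a)
      let d := a * a + b * b
      if (i + 1) % 2 = 1 then (d, c + d) else (c, d)
termination_by i => i
decreasing_by exact Nat.div_lt_self (by omega) (by omega)

-- fibPairB computes Mathlib's Nat.fib (needed by loopB's termination proof below).
theorem fibPairB_spec : ∀ i : Nat, fibPairB i = ((Nat.fib i : Int), (Nat.fib (i + 1) : Int)) := by
  intro i
  induction i using Nat.strong_induction_on with
  | _ i ih =>
    match i with
    | 0 => simp [fibPairB]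
    | i + 1 =>
      rw [fibPairB]
      rw [ih ((i + 1) / 2) (Nat.div_lt_self (by omega) (by omega))]
      have hle : Nat.fib ((i + 1) / 2) ≤ 2 * Nat.fib ((i + 1) / 2 + 1) := by
        have := @Nat.fib_le_fib_succ ((i + 1) / 2)
        omega
      rcases Nat.even_or_odd (i + 1) with h | h
      · obtain ⟨k, hk⟩ := h
        have hk2 : i + 1 = 2 * k := by omega
        have hdiv : (i + 1) / 2 = k := by omega
        have hmod : ¬ ((i + 1) % 2 = 1) := by omega
        simp only [hdiv, hmod, if_false]
        rw [hk2, Nat.fib_two_mul, show 2 * k + 1 = 2 * k + 1 from rfl, Nat.fib_two_mul_add_one]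
        rw [hdiv] at hle
        push_cast [hle]
        ring_nf
      · obtain ⟨k, hk⟩ := h
        have hdiv : (i + 1) / 2 = k := by omega
        have hmod : (i + 1) % 2 = 1 := by omega
        simp only [hdiv, hmod, if_true]
        rw [hk, show 2 * k + 1 + 1 = 2 * k + 2 from rfl, Nat.fib_add_two,
            Nat.fib_two_mul, Nat.fib_two_mul_add_one]
        rw [hdiv] at hle
        push_cast [hle]
        ring_nf

-- Linear lower bound on fib (needed by loopB's termination proof below).
theorem fib_lb : ∀ i : Nat, i ≤ Nat.fib (i + 1) + 1 := by
  intro i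
  induction i using Nat.twoStepInduction with
  | zero => simp
  | one => simp [Nat.fib]
  | more n ih ih2 =>
      have h1 : 0 < Nat.fib (n + 1) := Nat.fib_pos.mpr (by omega)
      have h2 : Nat.fib (n + 1 + 1 + 1) = Nat.fib (n + 1) + Nat.fib (n + 1 + 1) := Nat.fib_add_two
      have h3 : Nat.fib (n + 2 + 1) = Nat.fib (n + 1 + 1 + 1) := rfl
      have h4 : Nat.fib (n + 2) = Nat.fib (n + 1 + 1) := rfl
      omega

-- Source B's while loop over the index i: while _fib_pair(i)[0] <= n, append
-- [_fib_pair(i)[0], _fib_pair(i-1)[0]] and i += 1; terminates because fib i > n once i > n + 2.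
-- fib_lb without the +1 index shift, total in i.
theorem fib_lb' : ∀ i : Nat, i ≤ Nat.fib i + 2 := by
  intro i
  match i with
  | 0 => omega
  | j + 1 => have := fib_lb j; omega

def loopB (n : Int) (i : Nat) : List (List Int) :=
  if h : (fibPairB i).1 ≤ n then
    [(fibPairB i).1, (fibPairB (i - 1)).1] :: loopB n (i + 1)
  else []
termination_by (n + 3 - i).toNat
decreasing_by
  rw [fibPairB_spec] at h
  have h4 := fib_lb' i
  omega

def make_fibonacci_set_alt (n : Int) : List (List Int) :=
  [[0, 0], [1, 1]] ++ loopB n 3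

-- ===== PRECONDITION & SPEC =====
def Spec_make_fibonacci_set (n : Int) (out : List (List Int)) : Prop := out = make_fibonacci_set_alt n
instance (n : Int) (out : List (List Int)) : Decidable (Spec_make_fibonacci_set n out) := by unfold Spec_make_fibonacci_set; infer_instance

-- ===== CLAIM (what is proved, stated in full; the proofs are below) =====
def Claim_equal_make_fibonacci_set : Prop := ∀ (n : Int), Dom_make_fibonacci_set n → Spec_make_fibonacci_set n (make_fibonacci_set n)

-- ===== LEMMAS AND PROOFS =====

-- Accumulator- and fuel-free version of A's loop, for reasoning.
def tailA (n k v : Int) (hk : 1 ≤ k) (hv : 1 ≤ v) : List (List Int) :=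
  if h : k + v ≤ n then [k + v, k] :: tailA n (k + v) k (by omega) hk else []
termination_by (n + 1 - (k + v)).toNat
decreasing_by omega

theorem fibLoopA_eq (n : Int) (fuel : Nat) :
    ∀ (k v : Int) (hk : 1 ≤ k) (hv : 1 ≤ v), (n + 1 - (k + v)).toNat ≤ fuel →
    ∀ acc, fibLoopA n fuel k v acc = acc ++ tailA n k v hk hv := by
  induction fuel with
  | zero =>
      intro k v hk hv hf acc
      rw [tailA]
      have : ¬ (k + v ≤ n) := by omega
      simp [fibLoopA, this]
  | succ f ih =>
      intro k v hk hv hf acc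
      rw [tailA]
      by_cases h : k + v ≤ n
      · simp only [fibLoopA, h, if_true]
        rw [ih (k + v) k (by omega) hk (by omega)]
        simp
      · simp [fibLoopA, h]

-- A's recurrence state at index j is (fib (j+1), fib j), so its tail equals B's index loop.
theorem tailA_eq_loopB (n : Int) :
    ∀ (m j : Nat), 1 ≤ j → (n + 1 - (j : Int)).toNat ≤ m →
    ∀ (k v : Int) (hk : 1 ≤ k) (hv : 1 ≤ v),
      k = (Nat.fib (j + 1) : Int) → v = (Nat.fib j : Int) →
      tailA n k v hk hv = loopB n (j + 2) := by
  intro m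
  induction m with
  | zero =>
      intro j hj hm k v hk hv hkf hvf
      have hbig : (n : Int) ≤ (j : Int) - 1 := by omega
      have hfl : j + 1 ≤ Nat.fib (j + 2) + 1 := fib_lb (j + 1)
      have hguard : ¬ (k + v ≤ n) := by
        have : (Nat.fib (j + 2) : Int) = k + v := by
          rw [hkf, hvf]; push_cast [@Nat.fib_add_two j]; ring
        have hc : ((j + 1 : Nat) : Int) ≤ (Nat.fib (j + 2) : Int) + 1 := by exact_mod_cast hfl
        push_cast at hc
        omega
      rw [tailA, loopB]
      have hguard2 : ¬ ((fibPairB (j + 2)).1 ≤ n) := by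
        rw [fibPairB_spec]
        have hc : ((j + 1 : Nat) : Int) ≤ (Nat.fib (j + 2) : Int) + 1 := by exact_mod_cast hfl
        push_cast at hc
        omega
      simp [hguard, hguard2]
  | succ m ih =>
      intro j hj hm k v hk hv hkf hvf
      have hsum : k + v = (Nat.fib (j + 2) : Int) := by
        rw [hkf, hvf]; push_cast [@Nat.fib_add_two j]; ring
      rw [tailA, loopB]
      by_cases h : (Nat.fib (j + 2) : Int) ≤ n
      · have hA : k + v ≤ n := by omega
        have hB : (fibPairB (j + 2)).1 ≤ n := by rw [fibPairB_spec]; exact h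
        simp only [hA, dite_true, hB, dite_true]
        have hfl : j + 1 ≤ Nat.fib (j + 2) + 1 := fib_lb (j + 1)
        have hjn : (j : Int) ≤ n := by
          have hc : ((j + 1 : Nat) : Int) ≤ (Nat.fib (j + 2) : Int) + 1 := by exact_mod_cast hfl
          push_cast at hc
          omega
        have hrec := ih (j + 1) (by omega) (by push_cast; omega) (k + v) k (by omega) hk
          (by rw [hsum]) (by rw [hkf])
        rw [hrec]
        congr 1
        rw [fibPairB_spec, fibPairB_spec]
        simp only [show j + 2 - 1 = j + 1 from rfl]
        rw [hsum, hkf]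
      · have hA : ¬ (k + v ≤ n) := by omega
        have hB : ¬ ((fibPairB (j + 2)).1 ≤ n) := by rw [fibPairB_spec]; exact h
        simp [hA, hB]

theorem make_fibonacci_set_eq (n : Int) : make_fibonacci_set n = make_fibonacci_set_alt n := by
  unfold make_fibonacci_set make_fibonacci_set_alt
  rw [fibLoopA_eq n (n + 2).toNat 1 1 (by norm_num) (by norm_num) (by omega)]
  rw [tailA_eq_loopB n (n + 1).toNat 1 (by norm_num) (by omega) 1 1 (by norm_num) (by norm_num)
      (by decide) (by decide)]
  simp

-- ===== VERDICT (by name: the statement is the Claim_ definition above) =====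
theorem make_fibonacci_set_spec : Claim_equal_make_fibonacci_set := by
  intro n _
  unfold Spec_make_fibonacci_set
  exact make_fibonacci_set_eq n
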